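-- pv_equiv track=rewrite | github.com/fmrchallenge/fmrbenchmark | domains/integrator_chains/analysis/tdstat.py | _get_index_list
-- ===== SOURCE A (Python) =====
-- def _get_index_list(indices_str, bounds):
--     if indices_str == '*':
--         indices = range(bounds[0], bounds[1]+1)
--     else:
--         indices = [bounds[0]+int(k) for k in indices_str.split(',')]
--         if (min(indices) < bounds[0]
--             or max(indices) > bounds[1]):
--             return None
--     return indices
-- ===== SOURCE B (Python) =====
-- def _get_index_list(indices_str, bounds):
--     if indices_str == '*':
--         return range(bounds[0], bounds[1] + 1)
--     return _parse_bounded(indices_str, bounds)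
--
-- def _parse_bounded(s, bounds):
--     # recursive-descent over the string itself: peel the first comma-field
--     # with partition, validate it, cons it onto the parse of the remainder
--     head, sep, rest = s.partition(',')
--     idx = bounds[0] + int(head)
--     if idx < bounds[0] or idx > bounds[1]:
--         return None
--     if not sep:
--         return [idx]
--     tail = _parse_bounded(rest, bounds)
--     if tail is None:
--         return None
--     return [idx] + tail
-- ===== Notes on version B (the rewrite author's own statement) =====
-- stated objective: alternative
-- what changed: Replaces A's split-comprehension plus separate min/max scans with a recursive-descent parser that peels one comma-field at a time off the raw string with str.partition, validates it immediately, and conses it onto the recursive parse of the remainder.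
import Mathlib
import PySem

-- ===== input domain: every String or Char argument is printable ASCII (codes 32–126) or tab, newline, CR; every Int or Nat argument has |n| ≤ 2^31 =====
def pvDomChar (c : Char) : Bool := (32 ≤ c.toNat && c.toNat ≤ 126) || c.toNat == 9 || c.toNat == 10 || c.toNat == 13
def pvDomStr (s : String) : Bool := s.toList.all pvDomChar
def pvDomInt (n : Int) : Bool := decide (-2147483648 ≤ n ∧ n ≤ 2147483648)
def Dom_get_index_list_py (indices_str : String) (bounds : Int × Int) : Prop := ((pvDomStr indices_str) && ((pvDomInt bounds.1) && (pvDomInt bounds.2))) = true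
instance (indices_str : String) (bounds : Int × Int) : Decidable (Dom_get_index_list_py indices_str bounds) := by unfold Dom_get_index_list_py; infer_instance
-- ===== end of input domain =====

-- B replaces A's split + build + min/max scans with a recursive-descent parse of the raw
-- string (partition off one comma-field, validate, recurse); objective: alternative (same cost).


-- ===== PORT A =====
-- int(k) is ported as (PySem.Int.ofStr? k).getD 0; the default is never reached under Pre_ (all tokens parse).
def get_index_list_py (indices_str : String) (bounds : Int × Int) : Option (List Int) :=
  if indices_str == "*" then
    some (PySem.List.pyRange bounds.1 (bounds.2 + 1) 1)
  else
    let indices := (((PySem.Str.split? indices_str ",").getD [])).map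
      (fun k => bounds.1 + (PySem.Int.ofStr? k).getD 0)
    match PySem.List.min? indices (fun x => x), PySem.List.max? indices (fun x => x) with
    | some mn, some mx =>
        if mn < bounds.1 ∨ bounds.2 < mx then none else some indices
    | _, _ => some indices  -- unreachable: split(',') never yields an empty list (Python min([]) would raise)

-- ===== PORT B =====
-- hand port of Source B's _parse_bounded: s.partition(',') (scan to the first ',', head / rest)
-- is inlined as a character scan that accumulates the head in `pre` (reversed); on the
-- separator (or the end of the string) the head is int-parsed and bound-checked, then the
-- remainder is parsed recursively and the index consed on front — exact for the single-char separator.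
def parseBounded (b0 b1 : Int) (pre : List Char) (cs : List Char) : Option (List Int) :=
  match cs with
  | [] =>  -- no ',' found: sep empty, head = pre.reverse, return [idx]
      let idx := b0 + (PySem.Int.ofChars? pre.reverse).getD 0
      if idx < b0 ∨ b1 < idx then none else some [idx]
  | c :: rest =>
      if c = ',' then
        let idx := b0 + (PySem.Int.ofChars? pre.reverse).getD 0
        if idx < b0 ∨ b1 < idx then none
        else
          match parseBounded b0 b1 [] rest with
          | none => none
          | some tail => some (idx :: tail)
      else parseBounded b0 b1 (c :: pre) rest

def get_index_list_py_alt (indices_str : String) (bounds : Int × Int) : Option (List Int) :=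
  if indices_str == "*" then
    some (PySem.List.pyRange bounds.1 (bounds.2 + 1) 1)
  else
    parseBounded bounds.1 bounds.2 [] indices_str.toList

-- ===== PRECONDITION & SPEC =====
-- Pre_ excludes exactly the inputs where Python's int(k) raises ValueError on some comma-token (A always raises there).
def Pre_get_index_list_py (indices_str : String) (bounds : Int × Int) : Prop :=
  indices_str = "*" ∨
    ∀ k ∈ ((PySem.Str.split? indices_str ",").getD []), (PySem.Int.ofStr? k).isSome = true

instance (indices_str : String) (bounds : Int × Int) : Decidable (Pre_get_index_list_py indices_str bounds) := by unfold Pre_get_index_list_py; infer_instance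

def pvWitness_get_index_list_py : String × (Int × Int) := ("0,2,1", (3, 6))

def Spec_get_index_list_py (indices_str : String) (bounds : Int × Int) (out : Option (List Int)) : Prop := out = get_index_list_py_alt indices_str bounds
instance (indices_str : String) (bounds : Int × Int) (out : Option (List Int)) : Decidable (Spec_get_index_list_py indices_str bounds out) := by unfold Spec_get_index_list_py; infer_instance

-- ===== CLAIM =====
def Claim_equal_get_index_list_py : Prop := ∀ (indices_str : String) (bounds : Int × Int), Dom_get_index_list_py indices_str bounds → Pre_get_index_list_py indices_str bounds → Spec_get_index_list_py indices_str bounds (get_index_list_py indices_str bounds)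

-- ===== LEMMAS AND PROOFS =====

-- reference form of splitting on a single ',' : `pre` carries the reversed chars of the current field
def splitC (pre : List Char) (cs : List Char) : List (List Char) :=
  match cs with
  | [] => [pre.reverse]
  | c :: rest => if c = ',' then pre.reverse :: splitC [] rest else splitC (c :: pre) rest

theorem splitC_ne_nil (pre cs : List Char) : splitC pre cs ≠ [] := by
  induction cs generalizing pre with
  | nil => simp [splitC]
  | cons c rest ih =>
    simp only [splitC]
    split
    · simp
    · exact ih (c :: pre)

theorem splitOn_go_comma (cs : List Char) : ∀ (fuel : Nat) (pre : List Char) (acc : List (List Char)),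
    cs.length < fuel →
    PySem.Chars.splitOn.go [','] fuel cs pre acc = acc.reverse ++ splitC pre cs := by
  induction cs with
  | nil =>
    intro fuel pre acc h
    match fuel, h with
    | fuel + 1, _ =>
      rw [PySem.Chars.splitOn.go.eq_def]
      simp [splitC]
  | cons c rest ih =>
    intro fuel pre acc h
    match fuel, h with
    | fuel + 1, h =>
      have hf : rest.length < fuel := by simpa using h
      rw [PySem.Chars.splitOn.go.eq_def]
      show (if List.isPrefixOf [','] (c :: rest) = true then
              PySem.Chars.splitOn.go [','] fuel (List.drop [','].length (c :: rest)) [] (pre.reverse :: acc)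
            else PySem.Chars.splitOn.go [','] fuel rest (c :: pre) acc) = _
      by_cases hc : c = ','
      · subst hc
        have hpm : List.isPrefixOf [','] (',' :: rest) = true := by simp [List.isPrefixOf]
        rw [if_pos hpm]
        simp only [List.length_cons, List.length_nil, Nat.zero_add, List.drop_one, List.tail_cons]
        rw [ih fuel [] (pre.reverse :: acc) hf]
        simp [splitC]
      · have hpm : ¬ (List.isPrefixOf [','] (c :: rest) = true) := by
          simp [List.isPrefixOf]; exact fun h => absurd h.symm hc
        rw [if_neg hpm, ih fuel (c :: pre) acc hf]
        simp [splitC, if_neg hc]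

theorem splitOn_comma (cs : List Char) : PySem.Chars.splitOn cs [','] = splitC [] cs := by
  rw [PySem.Chars.splitOn, splitOn_go_comma cs (cs.length + 1) [] [] (by omega)]
  simp

-- B's recursive parse = the all-at-once formulation over the fields of splitC
theorem parseBounded_eq (b0 b1 : Int) (cs pre : List Char) :
    parseBounded b0 b1 pre cs =
      if ∃ t ∈ splitC pre cs, (b0 + (PySem.Int.ofChars? t).getD 0 < b0 ∨
                               b1 < b0 + (PySem.Int.ofChars? t).getD 0) then none
      else some ((splitC pre cs).map (fun t => b0 + (PySem.Int.ofChars? t).getD 0)) := by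
  induction cs generalizing pre with
  | nil => simp [parseBounded, splitC]
  | cons c rest ih =>
    by_cases hc : c = ','
    · subst hc
      simp only [parseBounded, splitC, reduceIte]
      set g : List Char → Int := fun t => b0 + (PySem.Int.ofChars? t).getD 0 with hg
      by_cases h1 : g pre.reverse < b0 ∨ b1 < g pre.reverse
      · rw [if_pos h1, if_pos ⟨pre.reverse, List.mem_cons_self, h1⟩]
      · rw [if_neg h1, ih []]
        by_cases h2 : ∃ t ∈ splitC [] rest, (g t < b0 ∨ b1 < g t)
        · rw [if_pos h2,
              if_pos (show ∃ t ∈ pre.reverse :: splitC [] rest, (g t < b0 ∨ b1 < g t) by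
                rcases h2 with ⟨t, ht, hp⟩; exact ⟨t, List.mem_cons_of_mem _ ht, hp⟩)]
        · rw [if_neg h2,
              if_neg (show ¬ ∃ t ∈ pre.reverse :: splitC [] rest, (g t < b0 ∨ b1 < g t) by
                rintro ⟨t, ht, hp⟩
                rcases List.mem_cons.mp ht with rfl | ht
                · exact h1 hp
                · exact h2 ⟨t, ht, hp⟩)]
          simp [hg]
    · simp only [parseBounded, splitC, if_neg hc]
      exact ih (c :: pre)

-- A's min/max test = an existence test over the list
theorem minmax_any (xs : List Int) (b0 b1 mn mx : Int)
    (hmn : PySem.List.min? xs (fun x => x) = some mn)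
    (hmx : PySem.List.max? xs (fun x => x) = some mx) :
    (mn < b0 ∨ b1 < mx) ↔ ∃ x ∈ xs, (x < b0 ∨ b1 < x) := by
  constructor
  · rintro (h | h)
    · exact ⟨mn, PySem.List.min?_mem hmn, Or.inl h⟩
    · exact ⟨mx, PySem.List.max?_mem hmx, Or.inr h⟩
  · rintro ⟨x, hx, h | h⟩
    · exact Or.inl (lt_of_le_of_lt (PySem.List.min?_isMin hmn x hx) h)
    · exact Or.inr (lt_of_lt_of_le h (PySem.List.max?_isMax hmx x hx))

-- A's token list (as strings) maps, char-wise, to splitC [] of the string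
theorem toks_toList (s : String) :
    ((PySem.Str.split? s ",").getD []).map String.toList = splitC [] s.toList := by
  have h := PySem.Str.split?_map s ","
  rw [PySem.Chars.split?] at h
  simp only [List.isEmpty_iff, reduceCtorEq, if_false] at h
  rcases ho : PySem.Str.split? s "," with _ | ts
  · rw [ho] at h; simp at h
  · rw [ho] at h
    simp only [Option.map_some] at h
    have : ("," : String).toList = [','] := rfl
    rw [this] at h
    rw [splitOn_comma] at h
    simpa using h

-- ===== VERDICT =====
theorem get_index_list_py_spec : Claim_equal_get_index_list_py := by
  intro s bounds _ _
  unfold Spec_get_index_list_py get_index_list_py get_index_list_py_alt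
  by_cases hs : (s == "*") = true
  · simp [hs]
  · simp only [hs, Bool.false_eq_true, if_false]
    set f : String → Int := fun k => bounds.1 + (PySem.Int.ofStr? k).getD 0 with hf
    set g : List Char → Int := fun t => bounds.1 + (PySem.Int.ofChars? t).getD 0 with hg
    set toks := (PySem.Str.split? s ",").getD [] with htoks
    have hfg : toks.map f = (splitC [] s.toList).map g := by
      rw [← toks_toList s, ← htoks, List.map_map]
      apply List.map_congr_left
      intro k _
      simp [hf, hg, Function.comp, PySem.Int.ofStr?]
    rw [parseBounded_eq]
    rcases hmn : PySem.List.min? (toks.map f) (fun x => x) with _ | mn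
    · -- unreachable: split(',') never yields an empty token list
      exfalso
      have ht : toks.map f = [] := (PySem.List.min?_eq_none_iff _ _).mp hmn
      rw [hfg] at ht
      exact splitC_ne_nil [] s.toList (List.map_eq_nil_iff.mp ht)
    · rcases hmx : PySem.List.max? (toks.map f) (fun x => x) with _ | mx
      · rw [(PySem.List.max?_eq_none_iff _ _).mp hmx] at hmn
        rw [(PySem.List.min?_eq_none_iff _ _).mpr rfl] at hmn
        exact absurd hmn (by simp)
      · have hkey : (mn < bounds.1 ∨ bounds.2 < mx) ↔
            ∃ t ∈ splitC [] s.toList, (g t < bounds.1 ∨ bounds.2 < g t) := by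
          rw [minmax_any (toks.map f) bounds.1 bounds.2 mn mx hmn hmx, hfg]
          simp [List.mem_map]
        show (if mn < bounds.1 ∨ bounds.2 < mx then none else some (toks.map f)) = _
        by_cases hc : ∃ t ∈ splitC [] s.toList, (g t < bounds.1 ∨ bounds.2 < g t)
        · rw [if_pos (hkey.mpr hc), if_pos (by simpa [hg] using hc)]
        · rw [if_neg (fun h => hc (hkey.mp h)), if_neg (by simpa [hg] using hc)]
          rw [hfg]
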